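-- pv_equiv track=rewrite | github.com/voicegain/transcription-compare | wiki_wordnet_difficult_word.py | classify_three_type
-- ===== SOURCE A (Python) =====
-- import string
--
-- LETTER_LIST = set(string.ascii_letters)
--
-- DIGIT_LIST = set(string.digits)
--
-- def classify_three_type(word):
--     """
--     detect letter, digit, and other characters in the word
--     :param word:
--     :return: Three boolean has_letter, has_digit, has_notation
--     """
--
--     has_letter = False
--     has_digit = False
--     has_notation = False
--
--     for c in word:
--         if c in LETTER_LIST:
--             has_letter = True
--         elif c in DIGIT_LIST:
--             has_digit = True
--         else:
--             has_notation = True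
--
--     return has_letter, has_digit, has_notation
-- ===== SOURCE B (Python) =====
-- def classify_three_type(word):
--     """Three independent any() passes with code-point range tests instead of a
--     branching flag loop over set membership."""
--     has_letter = any('a' <= c <= 'z' or 'A' <= c <= 'Z' for c in word)
--     has_digit = any('0' <= c <= '9' for c in word)
--     has_notation = any(not ('a' <= c <= 'z' or 'A' <= c <= 'Z' or '0' <= c <= '9')
--                        for c in word)
--     return has_letter, has_digit, has_notation
-- ===== Notes on version B (the rewrite author's own statement) =====
-- stated objective: simpler
-- what changed: Replaced the single branching flag loop over set membership by three independent any() passes that test code-point ranges directly, so the LETTER_LIST/DIGIT_LIST sets disappear.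
import Mathlib
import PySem

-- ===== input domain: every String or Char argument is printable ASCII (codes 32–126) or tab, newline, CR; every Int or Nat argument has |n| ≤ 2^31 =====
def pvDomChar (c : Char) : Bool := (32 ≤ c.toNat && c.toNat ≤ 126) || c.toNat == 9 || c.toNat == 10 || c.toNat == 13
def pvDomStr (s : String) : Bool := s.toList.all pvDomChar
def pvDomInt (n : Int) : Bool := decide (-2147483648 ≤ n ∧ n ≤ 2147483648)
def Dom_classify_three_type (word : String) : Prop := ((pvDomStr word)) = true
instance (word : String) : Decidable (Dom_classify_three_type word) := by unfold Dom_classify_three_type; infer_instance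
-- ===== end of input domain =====

-- B replaces A's single branching flag loop over set membership by three independent
-- any-passes testing code-point ranges directly (simpler; same cost).


-- ===== PORT A =====
-- LETTER_LIST = set(string.ascii_letters); DIGIT_LIST = set(string.digits)
-- string.ascii_letters / string.digits written as Char-list literals
def pvAsciiLetters : List Char :=
  ['a','b','c','d','e','f','g','h','i','j','k','l','m','n','o','p','q','r','s','t','u','v','w','x','y','z',
   'A','B','C','D','E','F','G','H','I','J','K','L','M','N','O','P','Q','R','S','T','U','V','W','X','Y','Z']
def pvAsciiDigits : List Char := ['0','1','2','3','4','5','6','7','8','9']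
def LETTER_LIST : PySem.Set Char := PySem.Set.ofList pvAsciiLetters
def DIGIT_LIST : PySem.Set Char := PySem.Set.ofList pvAsciiDigits

def classify_three_type (word : String) : Bool × Bool × Bool :=
  word.toList.foldl (fun st c =>
    if PySem.Set.contains LETTER_LIST c then (true, st.2.1, st.2.2)
    else if PySem.Set.contains DIGIT_LIST c then (st.1, true, st.2.2)
    else (st.1, st.2.1, true)) (false, false, false)

-- ===== PORT B =====
-- 'a' <= c <= 'z' etc. ported as code-point range tests (exact: Python compares single
-- characters by code point)
def pvIsLetter (c : Char) : Bool := (97 ≤ c.toNat && c.toNat ≤ 122) || (65 ≤ c.toNat && c.toNat ≤ 90)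
def pvIsDigit (c : Char) : Bool := 48 ≤ c.toNat && c.toNat ≤ 57

def classify_three_type_alt (word : String) : Bool × Bool × Bool :=
  (word.toList.any pvIsLetter,
   word.toList.any pvIsDigit,
   word.toList.any (fun c => !(pvIsLetter c || pvIsDigit c)))

-- ===== PRECONDITION & SPEC =====
def Spec_classify_three_type (word : String) (out : Bool × Bool × Bool) : Prop := out = classify_three_type_alt word
instance (word : String) (out : Bool × Bool × Bool) : Decidable (Spec_classify_three_type word out) := by unfold Spec_classify_three_type; infer_instance

-- ===== CLAIM =====
def Claim_equal_classify_three_type : Prop := ∀ (word : String), Dom_classify_three_type word → Spec_classify_three_type word (classify_three_type word)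

-- ===== LEMMAS AND PROOFS =====

theorem mem_letter_iff (c : Char) : c ∈ LETTER_LIST ↔ pvIsLetter c = true := by
  unfold LETTER_LIST
  rw [PySem.Set.mem_ofList]
  constructor
  · intro h; fin_cases h <;> decide
  · intro h
    have hc : Char.ofNat c.toNat = c := Char.ofNat_toNat c
    simp only [pvIsLetter, Bool.or_eq_true, Bool.and_eq_true, decide_eq_true_eq] at h
    rcases h with ⟨h1, h2⟩ | ⟨h1, h2⟩ <;>
      (interval_cases h' : c.toNat <;> rw [← hc] <;> decide)

theorem mem_digit_iff (c : Char) : c ∈ DIGIT_LIST ↔ pvIsDigit c = true := by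
  unfold DIGIT_LIST
  rw [PySem.Set.mem_ofList]
  constructor
  · intro h; fin_cases h <;> decide
  · intro h
    have hc : Char.ofNat c.toNat = c := Char.ofNat_toNat c
    simp only [pvIsDigit, Bool.and_eq_true, decide_eq_true_eq] at h
    obtain ⟨h1, h2⟩ := h
    interval_cases h' : c.toNat <;> rw [← hc] <;> decide

theorem contains_letter (c : Char) : PySem.Set.contains LETTER_LIST c = pvIsLetter c := by
  rw [Bool.eq_iff_iff, PySem.Set.contains_iff]; exact mem_letter_iff c

theorem contains_digit (c : Char) : PySem.Set.contains DIGIT_LIST c = pvIsDigit c := by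
  rw [Bool.eq_iff_iff, PySem.Set.contains_iff]; exact mem_digit_iff c

theorem not_letter_of_digit (c : Char) (h : pvIsDigit c = true) : pvIsLetter c = false := by
  simp only [pvIsDigit, Bool.and_eq_true, decide_eq_true_eq] at h
  simp only [pvIsLetter, Bool.or_eq_false_iff, Bool.and_eq_false_iff,
    decide_eq_false_iff_not, not_le]
  omega

theorem foldl_flags (xs : List Char) (a b n : Bool) :
    xs.foldl (fun st c =>
      if PySem.Set.contains LETTER_LIST c then (true, st.2.1, st.2.2)
      else if PySem.Set.contains DIGIT_LIST c then (st.1, true, st.2.2)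
      else (st.1, st.2.1, true)) (a, b, n)
    = (a || xs.any pvIsLetter,
       b || xs.any (fun c => !pvIsLetter c && pvIsDigit c),
       n || xs.any (fun c => !pvIsLetter c && !pvIsDigit c)) := by
  induction xs generalizing a b n with
  | nil => simp
  | cons c xs ih =>
    rw [List.foldl_cons]
    by_cases hL : PySem.Set.contains LETTER_LIST c = true
    · rw [if_pos hL, ih]
      rw [contains_letter] at hL
      simp [hL]
    · by_cases hD : PySem.Set.contains DIGIT_LIST c = true
      · rw [if_neg hL, if_pos hD, ih]
        rw [contains_letter] at hL
        rw [contains_digit] at hD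
        simp only [Bool.not_eq_true] at hL
        simp [hL, hD]
      · rw [if_neg hL, if_neg hD, ih]
        rw [contains_letter] at hL
        rw [contains_digit] at hD
        simp only [Bool.not_eq_true] at hL hD
        simp [hL, hD]

theorem any_digit (xs : List Char) :
    xs.any (fun c => !pvIsLetter c && pvIsDigit c) = xs.any pvIsDigit := by
  have h : ∀ c, (!pvIsLetter c && pvIsDigit c) = pvIsDigit c := by
    intro c
    by_cases hD : pvIsDigit c = true
    · simp [hD, not_letter_of_digit c hD]
    · simp only [Bool.not_eq_true] at hD; simp [hD]
  simp only [h]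

-- ===== VERDICT =====
theorem classify_three_type_spec : Claim_equal_classify_three_type := by
  intro word _
  unfold Spec_classify_three_type classify_three_type classify_three_type_alt
  rw [foldl_flags, any_digit]
  simp [Bool.not_or]
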